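-- pv_equiv track=rewrite | github.com/Leapense/problems | 22871번: 징검다리 건너기 (large)/gen.py | solve_min_k
-- ===== SOURCE A (Python) =====
-- from collections import deque
-- from typing import List, Tuple
--
-- def can_reach(a: List[int], k: int) -> bool:
--     n = len(a)
--     vis = [False]*n
--     dq = deque([0])
--     vis[0] = True
--     while dq:
--         i = dq.popleft()
--         if i == n-1:
--             return True
--         # d는 최대 n-1-i까지만 시도하면 됨
--         max_d = min(k, n-1-i)
--         if max_d <= 0:
--             continue
--         # 주의: 파이썬은 느릴 수 있으므로 조기 가지치기 없음
--         for d in range(1, max_d+1):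
--             j = i + d
--             if vis[j]:
--                 continue
--             diff = abs(a[i] - a[j])
--             if d * (1 + diff) <= k:
--                 vis[j] = True
--                 dq.append(j)
--                 if j == n-1:
--                     return True
--     return False
--
-- def solve_min_k(a: List[int]) -> int:
--     n = len(a)
--     minA = min(a)
--     maxA = max(a)
--     lo = 0
--     hi = (n-1) * (1 + (maxA - minA))
--     while lo < hi:
--         mid = (lo + hi) // 2
--         if can_reach(a, mid):
--             hi = mid
--         else:
--             lo = mid + 1
--     return lo
-- ===== SOURCE B (Python) =====
-- def solve_min_k(a):
--     # Bottleneck shortest path on the forward-jump DAG: dist[j] is the minimal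
--     # over paths 0 -> j of the maximal edge cost d*(1+|height diff|); no binary
--     # search over the answer is needed since all edges go left-to-right.
--     n = len(a)
--     dist = [0] * n
--     for j in range(1, n):
--         best = max(dist[0], j * (1 + abs(a[0] - a[j])))
--         for i in range(1, j):
--             c = max(dist[i], (j - i) * (1 + abs(a[i] - a[j])))
--             if c < best:
--                 best = c
--         dist[j] = best
--     return dist[-1]
-- ===== Notes on version B (the rewrite author's own statement) =====
-- stated objective: faster
-- what changed: Replaces binary search over k with BFS feasibility checks by a single O(n^2) bottleneck (minimax) dynamic program over the forward-jump DAG, returning dist[n-1] directly.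
import Mathlib
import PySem

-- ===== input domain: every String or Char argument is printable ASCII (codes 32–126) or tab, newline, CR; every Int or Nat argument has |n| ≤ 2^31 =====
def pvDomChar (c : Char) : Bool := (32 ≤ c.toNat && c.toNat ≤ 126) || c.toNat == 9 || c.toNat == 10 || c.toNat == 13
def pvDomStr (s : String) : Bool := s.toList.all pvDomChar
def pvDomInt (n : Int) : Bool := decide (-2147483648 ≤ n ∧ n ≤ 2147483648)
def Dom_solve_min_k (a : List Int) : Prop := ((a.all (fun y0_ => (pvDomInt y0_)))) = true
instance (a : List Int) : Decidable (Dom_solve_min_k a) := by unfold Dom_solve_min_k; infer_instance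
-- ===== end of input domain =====

-- B replaces A's binary search over k (each step a BFS feasibility check) by one
-- O(n^2) bottleneck (minimax) dynamic program over the forward-jump DAG.

-- ===== PORT A =====
-- inner 'for d in range(1, max_d+1)' loop of can_reach; 'none' = Python's 'return True'
def pvAInner (a : List Int) (k : Int) (n i : Nat) (vis : List Bool) (dq : List Nat) :
    List Nat → Option (List Bool × List Nat)
  | [] => some (vis, dq)
  | d :: rest =>
    let j := i + d
    if vis.getD j false then pvAInner a k n i vis dq rest
    else
      let diff := |a.getD i 0 - a.getD j 0|
      if (d : Int) * (1 + diff) ≤ k then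
        if j = n - 1 then none
        else pvAInner a k n i (vis.set j true) (dq ++ [j]) rest
      else pvAInner a k n i vis dq rest

-- the 'while dq' loop; fuel 2*n is enough (proved below), fuel-out returns false
def pvABfs (a : List Int) (k : Int) (n : Nat) :
    Nat → List Bool → List Nat → Bool
  | 0, _, _ => false
  | fuel+1, vis, dq =>
    match dq with
    | [] => false
    | i :: rest =>
      if i = n - 1 then true
      else
        let max_d : Int := min k ((n : Int) - 1 - (i : Int))
        if max_d ≤ 0 then pvABfs a k n fuel vis rest
        else
          match pvAInner a k n i vis rest (List.range' 1 max_d.toNat) with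
          | none => true
          | some (vis', dq') => pvABfs a k n fuel vis' dq'

def pvACanReach (a : List Int) (k : Int) : Bool :=
  let n := a.length
  pvABfs a k n (2 * n) ((List.replicate n false).set 0 true) [0]

def pvABSearch (a : List Int) (lo hi : Int) : Int :=
  if h : lo < hi then
    let mid := PySem.Int.floordiv (lo + hi) 2
    if pvACanReach a mid then pvABSearch a lo mid
    else pvABSearch a (mid + 1) hi
  else lo
termination_by (hi - lo).toNat
decreasing_by
  · have h1 := PySem.Int.floordiv_two_mid_bounds (le_of_lt h)
    have h2 : PySem.Int.floordiv (lo + hi) 2 < hi := by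
      have := PySem.Int.floordiv_lt_iff_lt_mul (a := lo + hi) (b := 2) (q := hi) (by omega)
      omega
    omega
  · have h1 := PySem.Int.floordiv_two_mid_bounds (le_of_lt h)
    omega

def solve_min_k (a : List Int) : Int :=
  let n := a.length
  match PySem.List.min? a (fun x => x), PySem.List.max? a (fun x => x) with
  | some minA, some maxA => pvABSearch a 0 (((n : Int) - 1) * (1 + (maxA - minA)))
  | _, _ => 0   -- unreachable under Pre_: Python's min/max raise on the empty list

-- ===== PORT B =====
def solve_min_k_alt (a : List Int) : Int :=
  let n := a.length
  let dist := (List.range' 1 (n - 1)).foldl (fun (dist : List Int) (j : Nat) =>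
      let best := (List.range' 1 (j - 1)).foldl (fun (best : Int) (i : Nat) =>
          let c := max (dist.getD i 0)
            (((j : Int) - (i : Int)) * (1 + |a.getD i 0 - a.getD j 0|))
          if c < best then c else best)
        (max (dist.getD 0 0) ((j : Int) * (1 + |a.getD 0 0 - a.getD j 0|)))
      dist.set j best) (List.replicate n 0)
  dist.getD (n - 1) 0   -- dist[-1]; Pre_ excludes [], where Python raises IndexError

-- ===== PRECONDITION & SPEC =====
-- Pre_ excludes only the empty list, on which A raises ValueError (min of an empty sequence).
def Pre_solve_min_k (a : List Int) : Prop := a ≠ []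
instance (a : List Int) : Decidable (Pre_solve_min_k a) := by unfold Pre_solve_min_k; infer_instance
def pvWitness_solve_min_k : List Int := [0, 3, 1]

def Spec_solve_min_k (a : List Int) (out : Int) : Prop := out = solve_min_k_alt a
instance (a : List Int) (out : Int) : Decidable (Spec_solve_min_k a out) := by unfold Spec_solve_min_k; infer_instance

-- ===== CLAIM (what is proved, stated in full; the proofs are below) =====
def Claim_equal_solve_min_k : Prop := ∀ (a : List Int), Dom_solve_min_k a → Pre_solve_min_k a → Spec_solve_min_k a (solve_min_k a)

-- ===== LEMMAS AND PROOFS =====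

-- jump cost from stone i to stone j (i < j): d * (1 + |a[i] - a[j]|)
def pvW (a : List Int) (i j : Nat) : Int :=
  ((j : Int) - (i : Int)) * (1 + |a.getD i 0 - a.getD j 0|)

-- stone j is reachable from stone 0 using only jumps of cost ≤ k
inductive pvReach (a : List Int) (k : Int) : Nat → Prop
  | zero : pvReach a k 0
  | step {i j : Nat} : pvReach a k i → i < j → j < a.length → pvW a i j ≤ k → pvReach a k j

lemma pvW_pos (a : List Int) (i j : Nat) (hij : i < j) : 0 < pvW a i j := by
  have h1 : (0:Int) < (j : Int) - (i : Int) := by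
    have : (i : Int) < (j : Int) := by exact_mod_cast hij
    omega
  have h2 : (0:Int) < 1 + |a.getD i 0 - a.getD j 0| := by positivity
  exact mul_pos h1 h2

lemma pvW_ge_d (a : List Int) (i j : Nat) (hij : i < j) : (j : Int) - (i : Int) ≤ pvW a i j := by
  have h1 : (0:Int) ≤ (j : Int) - (i : Int) := by
    have : (i:Int) ≤ (j:Int) := by exact_mod_cast Nat.le_of_lt hij
    omega
  have h2 : (1:Int) ≤ 1 + |a.getD i 0 - a.getD j 0| := by
    have := abs_nonneg (a.getD i 0 - a.getD j 0); omega
  calc (j : Int) - (i : Int) = ((j : Int) - (i : Int)) * 1 := by ring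
    _ ≤ pvW a i j := mul_le_mul_of_nonneg_left h2 h1

lemma pvReach_inv (a : List Int) (k : Int) (j : Nat) (hj : j ≠ 0) (h : pvReach a k j) :
    ∃ i, i < j ∧ j < a.length ∧ pvW a i j ≤ k ∧ pvReach a k i := by
  cases h with
  | zero => exact absurd rfl hj
  | step hi hij hjn hw => exact ⟨_, hij, hjn, hw, hi⟩

-- getD helpers
lemma pvGetD_set_self {α : Type} (l : List α) (j : Nat) (x d : α) (h : j < l.length) :
    (l.set j x).getD j d = x := by
  simp [List.getD, h]

lemma pvGetD_set_ne {α : Type} (l : List α) (j m : Nat) (x d : α) (h : j ≠ m) :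
    (l.set m x).getD j d = l.getD j d := by
  simp [List.getD, List.getElem?_set_ne (Ne.symm h)]

lemma pvVisited_lt (vis : List Bool) (j : Nat) (h : vis.getD j false = true) : j < vis.length := by
  by_contra hn
  have hnone : vis[j]? = none := List.getElem?_eq_none (by omega)
  simp [List.getD, hnone] at h

lemma pvVis_mono (vis : List Bool) (m j : Nat) (h : vis.getD j false = true) :
    (vis.set m true).getD j false = true := by
  by_cases hjm : j = m
  · subst hjm
    exact pvGetD_set_self _ _ _ _ (pvVisited_lt _ _ h)
  · rw [pvGetD_set_ne _ _ _ _ _ hjm]; exact h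

lemma pvCount_set (vis : List Bool) (j : Nat) (h : j < vis.length)
    (hf : vis.getD j false = false) :
    vis.count false = (vis.set j true).count false + 1 := by
  induction vis generalizing j with
  | nil => simp at h
  | cons b t ih =>
    cases j with
    | zero =>
      simp [List.getD] at hf
      subst hf
      simp
    | succ m =>
      simp at h
      have := ih m h (by simpa [List.getD] using hf)
      simp only [List.set, List.count_cons]
      omega

lemma pvGetD_mem (a : List Int) (j : Nat) (h : j < a.length) : a.getD j 0 ∈ a := by
  rw [List.getD_eq_getElem _ _ h]
  exact List.getElem_mem h

-- ===== BFS (port A) correctness =====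

def pvInv (a : List Int) (k : Int) (vis : List Bool) (dq : List Nat) : Prop :=
  vis.length = a.length ∧
  vis.getD 0 false = true ∧
  (∀ j, vis.getD j false = true → pvReach a k j) ∧
  (∀ j ∈ dq, vis.getD j false = true) ∧
  (∀ i, vis.getD i false = true → i ∉ dq →
    ∀ j, i < j → j < a.length → pvW a i j ≤ k → vis.getD j false = true) ∧
  (vis.getD (a.length - 1) false = false ∨ a.length - 1 ∈ dq)

-- closed visited set contains everything reachable
lemma pvClosure (a : List Int) (k : Int) (vis : List Bool)
    (h0 : vis.getD 0 false = true)
    (hcl : ∀ i, vis.getD i false = true →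
      ∀ j, i < j → j < a.length → pvW a i j ≤ k → vis.getD j false = true)
    (j : Nat) (hr : pvReach a k j) : vis.getD j false = true := by
  induction hr with
  | zero => exact h0
  | step hi hij hjn hw ih => exact hcl _ ih _ hij hjn hw

lemma pvInner_lemma (a : List Int) (k : Int) (i : Nat)
    (hri : pvReach a k i) :
    ∀ (ds : List Nat) (vis : List Bool) (dq : List Nat),
    (∀ d ∈ ds, 1 ≤ d ∧ i + d ≤ a.length - 1) →
    vis.length = a.length →
    (∀ j, vis.getD j false = true → pvReach a k j) →
    (∀ j ∈ dq, vis.getD j false = true) →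
    (1 ≤ a.length) →
    match pvAInner a k (a.length) i vis dq ds with
    | none => pvReach a k (a.length - 1)
    | some (vis', dq') =>
        vis'.length = a.length ∧
        (∀ j, vis.getD j false = true → vis'.getD j false = true) ∧
        (∀ j, vis'.getD j false = true → pvReach a k j) ∧
        (∀ j ∈ dq', vis'.getD j false = true) ∧
        (∀ d ∈ ds, (d:Int) * (1 + |a.getD i 0 - a.getD (i+d) 0|) ≤ k →
          vis'.getD (i+d) false = true) ∧
        (vis.getD (a.length - 1) false = false → vis'.getD (a.length - 1) false = false) ∧
        2 * vis'.count false + dq'.length ≤ 2 * vis.count false + dq.length ∧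
        (∀ j ∈ dq, j ∈ dq') ∧
        (∀ j, vis'.getD j false = true → vis.getD j false = true ∨ j ∈ dq') := by
  intro ds
  induction ds with
  | nil =>
    intro vis dq hds hlen hvr hdq hn1
    simp only [pvAInner]
    exact ⟨hlen, fun j h => h, hvr, hdq, by simp, fun h => h, le_refl _, fun j h => h,
      fun j h => Or.inl h⟩
  | cons d rest ih =>
    intro vis dq hds hlen hvr hdq hn1
    obtain ⟨hd1, hdle⟩ := hds d (List.mem_cons_self)
    have hdsrest : ∀ d' ∈ rest, 1 ≤ d' ∧ i + d' ≤ a.length - 1 :=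
      fun d' h => hds d' (List.mem_cons_of_mem _ h)
    simp only [pvAInner]
    by_cases hv : vis.getD (i + d) false = true
    · rw [if_pos hv]
      have key := ih vis dq hdsrest hlen hvr hdq hn1
      cases hres : pvAInner a k a.length i vis dq rest with
      | none => rw [hres] at key; exact key
      | some p =>
        obtain ⟨vis', dq'⟩ := p
        rw [hres] at key
        obtain ⟨l, mono, vr, dqv, cov, tgt, cnt, sub, prov⟩ := key
        refine ⟨l, mono, vr, dqv, ?_, tgt, cnt, sub, prov⟩
        intro d' hd' hc
        rcases List.mem_cons.mp hd' with rfl | hd'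
        · exact mono _ hv
        · exact cov d' hd' hc
    · rw [if_neg hv]
      have hvf : vis.getD (i + d) false = false := by
        cases h : vis.getD (i + d) false
        · rfl
        · exact absurd h hv
      by_cases hc : (d : Int) * (1 + |a.getD i 0 - a.getD (i + d) 0|) ≤ k
      · rw [if_pos hc]
        have hjlt : i + d < a.length := by omega
        have hwle : pvW a i (i + d) ≤ k := by
          have : ((i + d : Nat) : Int) - (i : Int) = (d : Int) := by push_cast; ring
          simpa [pvW, this] using hc
        have hrj : pvReach a k (i + d) := pvReach.step hri (by omega) hjlt hwle
        by_cases hj : i + d = a.length - 1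
        · rw [if_pos hj]
          exact hj ▸ hrj
        · rw [if_neg hj]
          have hjvl : i + d < vis.length := by omega
          have hlen' : (vis.set (i + d) true).length = a.length := by
            simpa using hlen
          have hvr' : ∀ j, (vis.set (i + d) true).getD j false = true → pvReach a k j := by
            intro j hjv
            by_cases hji : j = i + d
            · exact hji ▸ hrj
            · rw [pvGetD_set_ne _ _ _ _ _ hji] at hjv
              exact hvr j hjv
          have hdq' : ∀ j ∈ dq ++ [i + d], (vis.set (i + d) true).getD j false = true := by
            intro j hj'
            rcases List.mem_append.mp hj' with hj' | hj'
            · exact pvVis_mono _ _ _ (hdq j hj')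
            · simp at hj'
              subst hj'
              exact pvGetD_set_self _ _ _ _ hjvl
          have key := ih (vis.set (i + d) true) (dq ++ [i + d]) hdsrest hlen' hvr' hdq' hn1
          cases hres : pvAInner a k a.length i (vis.set (i + d) true) (dq ++ [i + d]) rest with
          | none => rw [hres] at key; exact key
          | some p =>
            obtain ⟨vis', dq'⟩ := p
            rw [hres] at key
            obtain ⟨l, mono, vr, dqv, cov, tgt, cnt, sub, prov⟩ := key
            have mono2 : ∀ j, vis.getD j false = true → vis'.getD j false = true :=
              fun j h => mono j (pvVis_mono _ _ _ h)
            refine ⟨l, mono2, vr, dqv, ?_, ?_, ?_, ?_, ?_⟩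
            · intro d' hd' hc'
              rcases List.mem_cons.mp hd' with rfl | hd'
              · exact mono _ (pvGetD_set_self _ _ _ _ hjvl)
              · exact cov d' hd' hc'
            · intro htf
              apply tgt
              rw [pvGetD_set_ne _ _ _ _ _ (by omega)]
              exact htf
            · have hcnt1 : vis.count false = (vis.set (i + d) true).count false + 1 :=
                pvCount_set vis (i + d) hjvl hvf
              have : (dq ++ [i + d]).length = dq.length + 1 := by simp
              omega
            · intro j hj'
              exact sub j (List.mem_append.mpr (Or.inl hj'))
            · intro j hjv
              rcases prov j hjv with h | h
              · by_cases hji : j = i + d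
                · exact Or.inr (sub j (List.mem_append.mpr (Or.inr (by simp [hji]))))
                · rw [pvGetD_set_ne _ _ _ _ _ hji] at h
                  exact Or.inl h
              · exact Or.inr h
      · rw [if_neg hc]
        have key := ih vis dq hdsrest hlen hvr hdq hn1
        cases hres : pvAInner a k a.length i vis dq rest with
        | none => rw [hres] at key; exact key
        | some p =>
          obtain ⟨vis', dq'⟩ := p
          rw [hres] at key
          obtain ⟨l, mono, vr, dqv, cov, tgt, cnt, sub, prov⟩ := key
          refine ⟨l, mono, vr, dqv, ?_, tgt, cnt, sub, prov⟩
          intro d' hd' hc'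
          rcases List.mem_cons.mp hd' with rfl | hd'
          · exact absurd hc' hc
          · exact cov d' hd' hc'

lemma pvDeadEnd (a : List Int) (k : Int) (vis : List Bool)
    (hInv : pvInv a k vis []) : ¬ pvReach a k (a.length - 1) := by
  obtain ⟨hlen, h0, hvr, hdq, hcl, htgt⟩ := hInv
  intro hr
  have hvis := pvClosure a k vis h0 (fun i hi => hcl i hi (by simp)) _ hr
  rcases htgt with h | h
  · rw [hvis] at h; cases h
  · simp at h

lemma pvBfs_main (a : List Int) (k : Int) :
    ∀ (fuel : Nat) (vis : List Bool) (dq : List Nat),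
    pvInv a k vis dq →
    2 * vis.count false + dq.length ≤ fuel →
    (pvABfs a k a.length fuel vis dq = true ↔ pvReach a k (a.length - 1)) := by
  intro fuel
  induction fuel with
  | zero =>
    intro vis dq hInv hb
    have hdq : dq = [] := by
      cases dq with
      | nil => rfl
      | cons x t => simp at hb
    subst hdq
    simp only [pvABfs, Bool.false_eq_true, false_iff]
    exact pvDeadEnd a k vis hInv
  | succ fuel ih =>
    intro vis dq hInv hb
    cases dq with
    | nil =>
      simp only [pvABfs, Bool.false_eq_true, false_iff]
      exact pvDeadEnd a k vis hInv
    | cons i rest =>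
      obtain ⟨hlen, h0, hvr, hdqv, hcl, htgt⟩ := hInv
      simp only [pvABfs]
      by_cases hi : i = a.length - 1
      · rw [if_pos hi]
        have hri : pvReach a k i := hvr i (hdqv i List.mem_cons_self)
        simp only [true_iff]
        exact hi ▸ hri
      · rw [if_neg hi]
        have hvisi : vis.getD i false = true := hdqv i List.mem_cons_self
        have hri : pvReach a k i := hvr i hvisi
        have hiln : i < a.length := by
          have := pvVisited_lt vis i hvisi; omega
        have hn1 : 1 ≤ a.length := by omega
        have htgt' : vis.getD (a.length - 1) false = false ∨ a.length - 1 ∈ rest := by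
          rcases htgt with h | h
          · exact Or.inl h
          · rcases List.mem_cons.mp h with h | h
            · exact absurd h.symm hi
            · exact Or.inr h
        by_cases hmd : min k ((a.length : Int) - 1 - (i : Int)) ≤ 0
        · rw [if_pos hmd]
          have hk0 : k ≤ 0 := by
            have h2 : i + 2 ≤ a.length := by omega
            have h3 : (i : Int) + 2 ≤ (a.length : Int) := by exact_mod_cast h2
            omega
          apply ih vis rest ?_ ?_
          · refine ⟨hlen, h0, hvr, fun j hj => hdqv j (List.mem_cons_of_mem _ hj), ?_, htgt'⟩
            intro i' hvi' hni' j hij hjn hw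
            exfalso
            have := pvW_pos a i' j hij
            omega
          · simp at hb; omega
        · rw [if_neg hmd]
          have hmdpos : 0 < min k ((a.length : Int) - 1 - (i : Int)) := by omega
          have hcast : ((min k ((a.length : Int) - 1 - (i : Int))).toNat : Int)
              = min k ((a.length : Int) - 1 - (i : Int)) :=
            Int.toNat_of_nonneg (le_of_lt hmdpos)
          have hds : ∀ d ∈ List.range' 1 (min k ((a.length : Int) - 1 - (i : Int))).toNat,
              1 ≤ d ∧ i + d ≤ a.length - 1 := by
            intro d hd
            rw [List.mem_range'_1] at hd
            refine ⟨hd.1, ?_⟩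
            have hdle : (d : Int) ≤ min k ((a.length : Int) - 1 - (i : Int)) := by
              have : d ≤ (min k ((a.length : Int) - 1 - (i : Int))).toNat := by omega
              omega
            have : (d : Int) ≤ (a.length : Int) - 1 - (i : Int) := le_trans hdle (min_le_right _ _)
            have h1 : ((i + d : Nat) : Int) ≤ (a.length : Int) - 1 := by push_cast; omega
            have h2 : ((a.length - 1 : Nat) : Int) = (a.length : Int) - 1 := by
              push_cast [hn1]; omega
            have := h1.trans_eq h2.symm
            exact_mod_cast this
          have key := pvInner_lemma a k i hri
            (List.range' 1 (min k ((a.length : Int) - 1 - (i : Int))).toNat) vis rest hds hlen hvr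
            (fun j hj => hdqv j (List.mem_cons_of_mem _ hj)) hn1
          cases hres : pvAInner a k a.length i vis rest
              (List.range' 1 (min k ((a.length : Int) - 1 - (i : Int))).toNat) with
          | none =>
            rw [hres] at key
            simp only [true_iff]
            exact key
          | some p =>
            obtain ⟨vis', dq'⟩ := p
            rw [hres] at key
            obtain ⟨hlen', mono, hvr', hdq', cov, tgt', cnt, sub, prov⟩ := key
            apply ih vis' dq' ?_ ?_
            · refine ⟨hlen', mono 0 h0, hvr', hdq', ?_, ?_⟩
              · intro i' hvi' hni' j hij hjn hw
                rcases prov i' hvi' with hold | hin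
                · by_cases hii : i' = i
                  · subst hii
                    have hd1 : 1 ≤ j - i' := by omega
                    have hdint : ((j - i' : Nat) : Int) = (j : Int) - (i' : Int) := by
                      omega
                    have hdlek : ((j - i' : Nat) : Int) ≤ k := by
                      rw [hdint]
                      exact le_trans (pvW_ge_d a i' j hij) hw
                    have hdlen : ((j - i' : Nat) : Int) ≤ (a.length : Int) - 1 - (i' : Int) := by
                      rw [hdint]
                      omega
                    have hmem : j - i' ∈ List.range' 1 (min k ((a.length : Int) - 1 - (i' : Int))).toNat := by
                      rw [List.mem_range'_1]
                      refine ⟨hd1, ?_⟩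
                      have : ((j - i' : Nat) : Int) ≤ min k ((a.length : Int) - 1 - (i' : Int)) :=
                        le_min hdlek hdlen
                      omega
                    have hji : i' + (j - i') = j := by omega
                    have := cov (j - i') hmem ?_
                    · rwa [hji] at this
                    · rw [hji]
                      have : ((j - i' : Nat) : Int) = (j : Int) - (i' : Int) := hdint
                      calc ((j - i' : Nat) : Int) * (1 + |a.getD i' 0 - a.getD j 0|)
                          = pvW a i' j := by rw [this]; rfl
                        _ ≤ k := hw
                  · have hnotrest : i' ∉ rest := fun hmem => hni' (sub i' hmem)
                    have hnot : i' ∉ i :: rest := by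
                      simp [hii, hnotrest]
                    exact mono j (hcl i' hold hnot j hij hjn hw)
                · exact absurd hin hni'
              · rcases htgt' with h | h
                · exact Or.inl (tgt' h)
                · exact Or.inr (sub _ h)
            · simp at hb cnt ⊢
              omega

lemma pvCanReach_char (a : List Int) (k : Int) (ha : a ≠ []) :
    (pvACanReach a k = true ↔ pvReach a k (a.length - 1)) := by
  have hn1 : 1 ≤ a.length := List.length_pos_iff.mpr ha
  have hlen0 : (List.replicate a.length false).length = a.length := by simp
  have hvis0 : ∀ j, ((List.replicate a.length false).set 0 true).getD j false = true → j = 0 := by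
    intro j hj
    by_contra hj0
    rw [pvGetD_set_ne _ _ _ _ _ hj0] at hj
    simp [List.getD, List.getElem?_replicate] at hj
    split at hj <;> simp_all
  have h00 : ((List.replicate a.length false).set 0 true).getD 0 false = true :=
    pvGetD_set_self _ _ _ _ (by omega)
  have hcount : ((List.replicate a.length false).set 0 true).count false = a.length - 1 := by
    cases hlen : a.length with
    | zero => omega
    | succ m => simp [List.replicate_succ]
  simp only [pvACanReach]
  apply pvBfs_main
  · refine ⟨by simp, h00, ?_, ?_, ?_, ?_⟩
    · intro j hj
      rw [hvis0 j hj]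
      exact pvReach.zero
    · intro j hj
      simp at hj
      subst hj
      exact h00
    · intro i' hvi' hni' j hij hjn hw
      exfalso
      have := hvis0 i' hvi'
      subst this
      simp at hni'
    · by_cases h1 : a.length = 1
      · exact Or.inr (by simp [h1])
      · left
        have : a.length - 1 ≠ 0 := by omega
        rw [pvGetD_set_ne _ _ _ _ _ this]
        simp [List.getD, List.getElem?_replicate]
        split <;> simp
  · rw [hcount]
    simp
    omega

-- ===== DP (port B) correctness =====

def pvQ (a : List Int) (dist : List Int) (m : Nat) : Prop :=
  dist.length = a.length ∧
  dist.getD 0 0 = 0 ∧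
  (∀ i, 1 ≤ i → i ≤ m →
    0 ≤ dist.getD i 0 ∧ ∀ (c : Int), (dist.getD i 0 ≤ c ↔ pvReach a c i))

lemma pvFold_min_char (f : Nat → Int) (l : List Nat) (b0 : Int) :
    ((l.foldl (fun b i => if f i < b then f i else b) b0) = b0 ∨
      ∃ i ∈ l, (l.foldl (fun b i => if f i < b then f i else b) b0) = f i) ∧
    (l.foldl (fun b i => if f i < b then f i else b) b0) ≤ b0 ∧
    ∀ i ∈ l, (l.foldl (fun b i => if f i < b then f i else b) b0) ≤ f i := by
  induction l generalizing b0 with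
  | nil => simp
  | cons x t ih =>
    simp only [List.foldl_cons]
    by_cases hx : f x < b0
    · simp only [if_pos hx]
      obtain ⟨h1, h2, h3⟩ := ih (f x)
      refine ⟨?_, le_of_lt (lt_of_le_of_lt h2 hx), ?_⟩
      · rcases h1 with h | ⟨i, hi, h⟩
        · exact Or.inr ⟨x, by simp, h⟩
        · exact Or.inr ⟨i, by simp [hi], h⟩
      · intro i hi
        rcases List.mem_cons.mp hi with rfl | hi
        · exact h2
        · exact h3 i hi
    · simp only [if_neg hx]
      obtain ⟨h1, h2, h3⟩ := ih b0
      refine ⟨?_, h2, ?_⟩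
      · rcases h1 with h | ⟨i, hi, h⟩
        · exact Or.inl h
        · exact Or.inr ⟨i, by simp [hi], h⟩
      · intro i hi
        rcases List.mem_cons.mp hi with rfl | hi
        · exact le_trans h2 (not_lt.mp hx)
        · exact h3 i hi

def pvStep (a : List Int) (dist : List Int) (j : Nat) : List Int :=
  dist.set j ((List.range' 1 (j - 1)).foldl (fun (best : Int) (i : Nat) =>
      if max (dist.getD i 0) (((j : Int) - (i : Int)) * (1 + |a.getD i 0 - a.getD j 0|)) < best
      then max (dist.getD i 0) (((j : Int) - (i : Int)) * (1 + |a.getD i 0 - a.getD j 0|))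
      else best)
    (max (dist.getD 0 0) ((j : Int) * (1 + |a.getD 0 0 - a.getD j 0|))))

lemma pvDp_step (a : List Int) (dist : List Int) (m : Nat)
    (hQ : pvQ a dist m) (hm : m + 1 ≤ a.length - 1) :
    pvQ a (pvStep a dist (m + 1)) (m + 1) := by
  obtain ⟨hlen, h00, hchar⟩ := hQ
  have hn1 : 1 ≤ a.length := by omega
  have hjlt : m + 1 < a.length := by omega
  obtain ⟨hb1, hb2, hb3⟩ := pvFold_min_char
    (fun (i : Nat) => max (dist.getD i 0)
      ((((m + 1 : Nat) : Int) - (i : Int)) * (1 + |a.getD i 0 - a.getD (m + 1) 0|)))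
    (List.range' 1 (m + 1 - 1))
    (max (dist.getD 0 0) (((m + 1 : Nat) : Int) * (1 + |a.getD 0 0 - a.getD (m + 1) 0|)))
  have hW0 : (((m + 1 : Nat) : Int)) * (1 + |a.getD 0 0 - a.getD (m + 1) 0|)
      = pvW a 0 (m + 1) := by
    simp [pvW]
  -- the computed best value
  set B := (List.range' 1 (m + 1 - 1)).foldl
    (fun (best : Int) (i : Nat) =>
      if max (dist.getD i 0) ((((m + 1 : Nat) : Int) - (i : Int)) * (1 + |a.getD i 0 - a.getD (m + 1) 0|)) < best
      then max (dist.getD i 0) ((((m + 1 : Nat) : Int) - (i : Int)) * (1 + |a.getD i 0 - a.getD (m + 1) 0|))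
      else best)
    (max (dist.getD 0 0) (((m + 1 : Nat) : Int) * (1 + |a.getD 0 0 - a.getD (m + 1) 0|))) with hBdef
  have hWi : ∀ i : Nat, (((m + 1 : Nat) : Int) - (i : Int)) * (1 + |a.getD i 0 - a.getD (m + 1) 0|)
      = pvW a i (m + 1) := fun i => rfl
  -- existence of a witness index
  have hex : ∃ i, i < m + 1 ∧ B = max (dist.getD i 0) (pvW a i (m + 1)) := by
    rcases hb1 with h | ⟨i, hi, h⟩
    · exact ⟨0, by omega, by rw [h, hW0]⟩
    · rw [List.mem_range'_1] at hi
      exact ⟨i, by omega, by rw [h, hWi]⟩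
  -- upper bound over all indices
  have hub : ∀ i, i < m + 1 → B ≤ max (dist.getD i 0) (pvW a i (m + 1)) := by
    intro i hi
    by_cases hi0 : i = 0
    · subst hi0
      rw [← hW0]
      exact hb2
    · have : i ∈ List.range' 1 (m + 1 - 1) := by
        rw [List.mem_range'_1]
        omega
      rw [← hWi]
      exact hb3 i this
  -- reach characterization of previous entries
  have hfwd : ∀ i, i < m + 1 → ∀ c : Int, dist.getD i 0 ≤ c → 0 ≤ c → pvReach a c i := by
    intro i hi c hdc hc0
    by_cases hi0 : i = 0
    · subst hi0; exact pvReach.zero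
    · exact ((hchar i (by omega) (by omega)).2 c).mp hdc
  have hbwd : ∀ i, i < m + 1 → ∀ c : Int, pvReach a c i → 0 ≤ c → dist.getD i 0 ≤ c := by
    intro i hi c hr hc0
    by_cases hi0 : i = 0
    · subst hi0; rw [h00]; exact hc0
    · exact ((hchar i (by omega) (by omega)).2 c).mpr hr
  have hBchar : ∀ c : Int, (B ≤ c ↔ pvReach a c (m + 1)) := by
    intro c
    constructor
    · intro hBc
      obtain ⟨i, hi, hB⟩ := hex
      rw [hB] at hBc
      have hdc : dist.getD i 0 ≤ c := le_trans (le_max_left _ _) hBc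
      have hwc : pvW a i (m + 1) ≤ c := le_trans (le_max_right _ _) hBc
      have hc0 : 0 ≤ c := le_trans (le_of_lt (pvW_pos a i (m + 1) (by omega))) hwc
      exact pvReach.step (hfwd i hi c hdc hc0) (by omega) hjlt hwc
    · intro hr
      obtain ⟨i, hij, hjn, hw, hri⟩ := pvReach_inv a c (m + 1) (by omega) hr
      have hc0 : 0 ≤ c := le_trans (le_of_lt (pvW_pos a i (m + 1) hij)) hw
      have hdc : dist.getD i 0 ≤ c := hbwd i hij c hri hc0
      exact le_trans (hub i hij) (max_le hdc hw)
  have hBnn : 0 ≤ B := by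
    obtain ⟨i, hi, hB⟩ := hex
    rw [hB]
    exact le_trans (le_of_lt (pvW_pos a i (m + 1) (by omega))) (le_max_right _ _)
  have hset : pvStep a dist (m + 1) = dist.set (m + 1) B := rfl
  rw [hset]
  refine ⟨by simpa using hlen, ?_, ?_⟩
  · rw [pvGetD_set_ne _ _ _ _ _ (by omega)]
    exact h00
  · intro i hi1 him
    by_cases hij : i = m + 1
    · subst hij
      rw [pvGetD_set_self _ _ _ _ (by omega)]
      exact ⟨hBnn, hBchar⟩
    · rw [pvGetD_set_ne _ _ _ _ _ hij]
      exact hchar i hi1 (by omega)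

lemma pvDp_loop (a : List Int) :
    ∀ (t m : Nat) (dist : List Int), m + t = a.length - 1 → pvQ a dist m →
    pvQ a ((List.range' (m + 1) t).foldl (fun dist j => pvStep a dist j) dist) (a.length - 1) := by
  intro t
  induction t with
  | zero =>
    intro m dist hmt hQ
    have hmeq : m = a.length - 1 := by omega
    simpa [List.range'] using (hmeq ▸ hQ)
  | succ t ih =>
    intro m dist hmt hQ
    rw [List.range'_succ]
    simp only [List.foldl_cons]
    exact ih (m + 1) (pvStep a dist (m + 1)) (by omega) (pvDp_step a dist m hQ (by omega))

lemma pvGetD_replicate_zero (n j : Nat) : (List.replicate n (0 : Int)).getD j 0 = 0 := by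
  simp [List.getD, List.getElem?_replicate]
  split <;> simp

lemma pvAlt_char (a : List Int) (ha : a ≠ []) :
    0 ≤ solve_min_k_alt a ∧
    ∀ (c : Int), 0 ≤ c → (solve_min_k_alt a ≤ c ↔ pvReach a c (a.length - 1)) := by
  have hn1 : 1 ≤ a.length := List.length_pos_iff.mpr ha
  have halt : solve_min_k_alt a =
      ((List.range' 1 (a.length - 1)).foldl (fun dist j => pvStep a dist j)
        (List.replicate a.length 0)).getD (a.length - 1) 0 := rfl
  have hQ0 : pvQ a (List.replicate a.length 0) 0 :=
    ⟨by simp, pvGetD_replicate_zero _ _, fun i hi1 hi0 => by omega⟩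
  have hQ := pvDp_loop a (a.length - 1) 0 (List.replicate a.length 0) (by omega) hQ0
  simp only [Nat.zero_add] at hQ
  obtain ⟨hlen, h00, hchar⟩ := hQ
  rw [halt]
  by_cases h1 : a.length = 1
  · rw [show a.length - 1 = 0 from by omega]
    simp only [List.range'_zero, List.foldl_nil]
    rw [pvGetD_replicate_zero]
    exact ⟨le_refl 0, fun c hc => iff_of_true hc pvReach.zero⟩
  · have h := hchar (a.length - 1) (by omega) (le_refl _)
    exact ⟨h.1, fun c hc => h.2 c⟩

-- ===== binary search =====

lemma pvBSearch_aux (a : List Int) (d : Int) :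
    ∀ (N : Nat) (lo hi : Int), (hi - lo).toNat ≤ N → 0 ≤ lo → lo ≤ d → d ≤ hi →
    (∀ m, lo ≤ m → (pvACanReach a m = true ↔ d ≤ m)) →
    pvABSearch a lo hi = d := by
  intro N
  induction N with
  | zero =>
    intro lo hi hN h0 hld hdh hcr
    rw [pvABSearch, dif_neg (by omega : ¬ lo < hi)]
    omega
  | succ N ih =>
    intro lo hi hN h0 hld hdh hcr
    by_cases hlh : lo < hi
    · rw [pvABSearch, dif_pos hlh]
      have hmid := PySem.Int.floordiv_two_mid_bounds (le_of_lt hlh)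
      have hmidlt : PySem.Int.floordiv (lo + hi) 2 < hi := by
        have := PySem.Int.floordiv_lt_iff_lt_mul (a := lo + hi) (b := 2) (q := hi) (by omega)
        omega
      by_cases hcrm : pvACanReach a (PySem.Int.floordiv (lo + hi) 2) = true
      · simp only [hcrm, if_true]
        have hdm : d ≤ PySem.Int.floordiv (lo + hi) 2 := (hcr _ (by omega)).mp hcrm
        exact ih lo _ (by omega) h0 hld hdm hcr
      · simp only [hcrm, Bool.false_eq_true, if_false]
        have hdm : ¬ d ≤ PySem.Int.floordiv (lo + hi) 2 :=
          fun h => hcrm ((hcr _ (by omega)).mpr h)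
        exact ih _ hi (by omega) (by omega) (by omega) hdh (fun m hm' => hcr m (by omega))
    · rw [pvABSearch, dif_neg hlh]
      omega

-- ===== VERDICT (by name: the statement is the Claim_ definition above) =====
theorem solve_min_k_spec : Claim_equal_solve_min_k := by
  intro a hDom hPre
  show solve_min_k a = solve_min_k_alt a
  have ha : a ≠ [] := hPre
  have hn1 : 1 ≤ a.length := List.length_pos_iff.mpr ha
  obtain ⟨hnn, hchar⟩ := pvAlt_char a ha
  simp only [solve_min_k]
  cases hmin : PySem.List.min? a (fun x => x) with
  | none => exact absurd ((PySem.List.min?_eq_none_iff a _).mp hmin) ha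
  | some minA =>
    cases hmax : PySem.List.max? a (fun x => x) with
    | none => exact absurd ((PySem.List.max?_eq_none_iff a _).mp hmax) ha
    | some maxA =>
      have hminle : ∀ y ∈ a, minA ≤ y := by
        have := PySem.List.min?_isMin hmin
        simpa using this
      have hmaxge : ∀ y ∈ a, y ≤ maxA := by
        have := PySem.List.max?_isMax hmax
        simpa using this
      have hmm : minA ≤ maxA := hminle maxA (PySem.List.max?_mem hmax)
      have hlen1 : (1 : Int) ≤ (a.length : Int) := by exact_mod_cast hn1
      have hcast : ((a.length - 1 : Nat) : Int) = (a.length : Int) - 1 := by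
        push_cast [hn1]
        omega
      have hhi0 : (0 : Int) ≤ ((a.length : Int) - 1) * (1 + (maxA - minA)) := by
        apply mul_nonneg <;> omega
      have hreachhi : pvReach a (((a.length : Int) - 1) * (1 + (maxA - minA))) (a.length - 1) := by
        by_cases h1 : a.length = 1
        · rw [show a.length - 1 = 0 from by omega]
          exact pvReach.zero
        · refine pvReach.step pvReach.zero (by omega) (by omega) ?_
          have hmem0 : a.getD 0 0 ∈ a := pvGetD_mem a 0 (by omega)
          have hmem1 : a.getD (a.length - 1) 0 ∈ a := pvGetD_mem a _ (by omega)
          have habs : |a.getD 0 0 - a.getD (a.length - 1) 0| ≤ maxA - minA := by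
            have h0l := hminle _ hmem0
            have h0u := hmaxge _ hmem0
            have h1l := hminle _ hmem1
            have h1u := hmaxge _ hmem1
            rw [abs_le]
            omega
          have hWeq : pvW a 0 (a.length - 1)
              = ((a.length : Int) - 1) * (1 + |a.getD 0 0 - a.getD (a.length - 1) 0|) := by
            simp [pvW, hcast]
          rw [hWeq]
          apply mul_le_mul_of_nonneg_left (by omega) (by omega)
      have hdphi := (hchar _ hhi0).mpr hreachhi
      exact pvBSearch_aux a (solve_min_k_alt a)
        ((((a.length : Int) - 1) * (1 + (maxA - minA)) - 0).toNat) 0 _ (le_refl _) (le_refl 0) hnn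
        hdphi (fun m hm => (pvCanReach_char a m ha).trans (hchar m hm).symm)
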